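-- pv_equiv track=rewrite | github.com/canplane/problem-solving | 230509_12-string/1706.py | f
-- ===== SOURCE A (Python) =====
-- def f(A, R, C):
-- 	ret = "z" * (R + C)
-- 	for y in range(R):
-- 		i = 0
-- 		while i < C:
-- 			j = i
-- 			while j < C and A[y][j] != "#":
-- 				j += 1
-- 			if j - i >= 2:
-- 				ret = min(ret, "".join(A[y][i:j]))
-- 			i = j + 1
-- 	return ret
-- ===== SOURCE B (Python) =====
-- def f(A, R, C):
--     ret = "z" * (R + C)
--     if R > 0 and C > 0:  # nothing to scan in an empty grid
--         for row in A[:R]: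
--             for seg in row[:C].split("#"):
--                 if len(seg) >= 2:
--                     ret = min(ret, seg)
--     return ret
-- ===== Notes on version B (the rewrite author's own statement) =====
-- stated objective: simpler
-- what changed: B replaces A's hand-written nested i/j while-loop index scanning with a per-row split('#')-then-scan decomposition: each row prefix row[:C] is cut into its maximal hash-free segments by str.split in one call and segments of length >= 2 update the running minimum.
import Mathlib
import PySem

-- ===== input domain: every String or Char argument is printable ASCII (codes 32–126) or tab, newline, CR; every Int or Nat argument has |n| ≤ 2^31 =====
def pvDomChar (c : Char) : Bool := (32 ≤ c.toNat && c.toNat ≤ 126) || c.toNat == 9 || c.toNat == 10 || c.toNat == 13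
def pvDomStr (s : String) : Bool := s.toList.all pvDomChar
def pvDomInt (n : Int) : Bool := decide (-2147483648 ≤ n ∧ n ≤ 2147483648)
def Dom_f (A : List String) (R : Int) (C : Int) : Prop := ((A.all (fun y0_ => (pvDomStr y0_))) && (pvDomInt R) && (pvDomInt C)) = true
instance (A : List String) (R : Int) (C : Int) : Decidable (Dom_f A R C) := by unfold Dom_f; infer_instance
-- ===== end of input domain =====

-- B replaces A's hand-written i/j index scanning with a split('#')-then-scan decomposition per row.

-- ===== PORT A =====
-- Python `min(a, b)` on strings (code-point order; the first argument wins ties)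
def pyminCL (a b : List Char) : List Char := if b < a then b else a

-- inner `while j < C and A[y][j] != "#": j += 1`
-- (an out-of-range read is a Python IndexError — outside Pre_f; the port stops there)
def fFindJ (l : List Char) (C : Int) (j : Int) : Int :=
  if _h : j < C then
    match PySem.List.pyGet? l j with
    | some c => if c ≠ '#' then fFindJ l C (j + 1) else j
    | none => j
  else j
termination_by (C - j).toNat
decreasing_by omega

-- needed by fRowLoop's termination proof
theorem le_fFindJ (l : List Char) (C j : Int) : j ≤ fFindJ l C j := by
  fun_induction fFindJ <;> omega

-- outer `while i < C` loop; `"".join(A[y][i:j])` of a string slice is that slice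
def fRowLoop (l : List Char) (C : Int) (i : Int) (ret : List Char) : List Char :=
  if _h : i < C then
    let j := fFindJ l C i
    fRowLoop l C (j + 1)
      (if 2 ≤ j - i then pyminCL ret (PySem.List.slice l (some i) (some j)) else ret)
  else ret
termination_by (C - i).toNat
decreasing_by have := le_fFindJ l C i; omega

def f (A : List String) (R : Int) (C : Int) : String :=
  String.ofList ((PySem.List.pyRange 0 R 1).foldl
    (fun ret y => fRowLoop (PySem.List.pyGetD A y "").toList C 0 ret)
    (List.replicate (R + C).toNat 'z'))

-- ===== PORT B =====
-- `if len(seg) >= 2: ret = min(ret, seg)`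
def fAltMin (ret seg : List Char) : List Char :=
  if 2 ≤ seg.length then pyminCL ret seg else ret

-- `for seg in row[:C].split("#"): …`
def fAltRow (C : Int) (ret : List Char) (row : String) : List Char :=
  (PySem.Chars.splitOn (PySem.List.slice row.toList none (some C)) ['#']).foldl fAltMin ret

def f_alt (A : List String) (R : Int) (C : Int) : String :=
  let ret := List.replicate (R + C).toNat 'z'
  String.ofList (if 0 < R ∧ 0 < C then
      (PySem.List.slice A none (some R)).foldl (fAltRow C) ret
    else ret)

-- ===== PRECONDITION & SPEC =====
-- Exactly the inputs where A returns: with 0 < C, A indexes every row y < R up to column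
-- C-1 and raises IndexError when R exceeds the number of rows or a scanned row is shorter
-- than C; with C ≤ 0 the scan touches nothing and A is total.
def Pre_f (A : List String) (R : Int) (C : Int) : Prop :=
  0 < C → R ≤ (A.length : Int) ∧ ∀ s ∈ A.take R.toNat, C ≤ (s.toList.length : Int)
instance (A : List String) (R : Int) (C : Int) : Decidable (Pre_f A R C) := by
  unfold Pre_f; infer_instance

def pvWitness_f : List String × Int × Int := (["ab#cd", "#e.gh"], 2, 5)

def Spec_f (A : List String) (R : Int) (C : Int) (out : String) : Prop := out = f_alt A R C
instance (A : List String) (R : Int) (C : Int) (out : String) : Decidable (Spec_f A R C out) := by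
  unfold Spec_f; infer_instance

-- ===== CLAIM (what is proved, stated in full; the proofs are below) =====
def Claim_equal_f : Prop := ∀ (A : List String) (R : Int) (C : Int), Dom_f A R C → Pre_f A R C → Spec_f A R C (f A R C)

-- ===== LEMMAS AND PROOFS =====

-- proof-side model of str.split("#") on a row
def mySplit : List Char → List Char → List (List Char)
  | pre, [] => [pre]
  | pre, c :: rest => if c = '#' then pre :: mySplit [] rest else mySplit (pre ++ [c]) rest

theorem go_eq (fuel : Nat) : ∀ (l cur : List Char) (acc : List (List Char)), l.length < fuel →
    PySem.Chars.splitOn.go ['#'] fuel l cur acc = acc.reverse ++ mySplit cur.reverse l := by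
  induction fuel with
  | zero => intro l cur acc h; omega
  | succ n IH =>
    intro l cur acc h
    match l with
    | [] => simp [PySem.Chars.splitOn.go, mySplit]
    | c :: rest =>
      rw [PySem.Chars.splitOn.go]
      by_cases hc : c = '#'
      · subst hc
        simp only [List.isPrefixOf, BEq.rfl, Bool.true_and, if_true,
          List.length_cons, List.length_nil, List.drop_succ_cons, List.drop_zero]
        rw [IH rest [] (cur.reverse :: acc) (by simpa using h)]
        simp [mySplit]
      · have : List.isPrefixOf ['#'] (c :: rest) = false := by
          simp [List.isPrefixOf]; exact fun h' => absurd h'.symm hc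
        rw [this]
        simp only [Bool.false_eq_true, if_false]
        rw [IH rest (c :: cur) acc (by simpa using h)]
        simp [mySplit, hc]

theorem splitOn_hash (l : List Char) : PySem.Chars.splitOn l ['#'] = mySplit [] l := by
  unfold PySem.Chars.splitOn
  simpa using go_eq (l.length + 1) l [] [] (by omega)

theorem mySplit_no_hash : ∀ (t pre : List Char), '#' ∉ t → mySplit pre t = [pre ++ t] := by
  intro t
  induction t with
  | nil => intro pre _; simp [mySplit]
  | cons c rest IH =>
    intro pre hmem
    have hc : c ≠ '#' := fun h => hmem (h ▸ List.mem_cons_self)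
    have : '#' ∉ rest := fun h => hmem (List.mem_cons_of_mem _ h)
    rw [mySplit, if_neg (fun h => hc h), IH _ this]
    simp

theorem mySplit_hash : ∀ (p : List Char) (pre r : List Char), '#' ∉ p →
    mySplit pre (p ++ '#' :: r) = (pre ++ p) :: mySplit [] r := by
  intro p
  induction p with
  | nil => intro pre r _; simp [mySplit]
  | cons c p' IH =>
    intro pre r hmem
    have hc : c ≠ '#' := fun h => hmem (h ▸ List.mem_cons_self)
    have : '#' ∉ p' := fun h => hmem (List.mem_cons_of_mem _ h)
    rw [List.cons_append, mySplit, if_neg (fun h => hc h), IH _ _ this]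
    simp

theorem fFindJ_spec (l : List Char) (C : Int) (hC : C.toNat ≤ l.length) :
    ∀ (n : Nat) (i : Int), (C - i).toNat = n → 0 ≤ i →
      fFindJ l C i = i + (((l.take C.toNat).drop i.toNat).takeWhile (· ≠ '#')).length := by
  intro n
  induction n using Nat.strong_induction_on with
  | _ n IH =>
    intro i hn hi
    rw [fFindJ]
    by_cases h : i < C
    · have hiC : i.toNat < C.toNat := by omega
      have hil : i.toNat < l.length := by omega
      have hget : PySem.List.pyGet? l i = some l[i.toNat] := by
        conv_lhs => rw [show i = ((i.toNat : Nat) : Int) by omega]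
        rw [PySem.List.pyGet?_natCast]
        simp [List.getElem?_eq_getElem hil]
      have hdrop : (l.take C.toNat).drop i.toNat
          = l[i.toNat] :: (l.take C.toNat).drop (i.toNat + 1) := by
        rw [List.drop_eq_getElem_cons (by simp; omega)]
        congr 1
        exact List.getElem_take
      rw [dif_pos h, hget]
      by_cases hc : l[i.toNat] = '#'
      · simp [hc, hdrop]
      · simp only [ne_eq, hc, not_false_eq_true, if_true]
        rw [IH ((C - (i + 1)).toNat) (by omega) (i + 1) rfl (by omega)]
        rw [hdrop, List.takeWhile_cons]
        simp only [ne_eq, hc, not_false_eq_true, decide_true, if_true, List.length_cons]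
        rw [show (i + 1).toNat = i.toNat + 1 by omega]
        push_cast
        ring
    · rw [dif_neg h]
      have : (l.take C.toNat).drop i.toNat = [] :=
        List.drop_eq_nil_of_le (by simp; omega)
      simp [this]

theorem fRowLoop_spec (l : List Char) (C : Int) (hC : C.toNat ≤ l.length) :
    ∀ (n : Nat) (i : Int), (C - i).toNat = n → 0 ≤ i → ∀ ret,
      fRowLoop l C i ret = (mySplit [] ((l.take C.toNat).drop i.toNat)).foldl fAltMin ret := by
  intro n
  induction n using Nat.strong_induction_on with
  | _ n IH =>
    intro i hn hi ret
    by_cases h : i < C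
    · set t := (l.take C.toNat).drop i.toNat with ht
      have hlt : t.length = C.toNat - i.toNat := by simp [ht]; omega
      set p := t.takeWhile (· ≠ '#') with hp
      have hj : fFindJ l C i = i + p.length := fFindJ_spec l C hC _ i rfl hi
      have hpt : p <+: t := List.takeWhile_prefix _
      have hple : p.length ≤ t.length := hpt.length_le
      have hpnh : '#' ∉ p := by
        intro hm
        have := List.mem_takeWhile_imp hm
        simp at this
      have htdrop : t = (l.drop i.toNat).take (C.toNat - i.toNat) := by
        rw [ht, List.drop_take]
      have hslice : PySem.List.slice l (some i) (some (i + (p.length : Int))) = p := by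
        rw [PySem.List.slice_toNat l hi (by omega)]
        have hpl : p <+: l.drop i.toNat :=
          hpt.trans (htdrop ▸ List.take_prefix _ _)
        rw [show (i + (p.length : Int)).toNat - i.toNat = p.length by omega]
        exact (List.prefix_iff_eq_take.mp hpl).symm
      rw [fRowLoop]
      rw [dif_pos h]
      simp only [hj, hslice, add_sub_cancel_left, Nat.ofNat_le_cast]
      by_cases hfull : p.length = t.length
      · have hpeq : p = t := hpt.eq_of_length (by omega)
        have hnh : '#' ∉ t := hpeq ▸ hpnh
        rw [fRowLoop, dif_neg (by omega)]
        rw [mySplit_no_hash t [] hnh]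
        simp [fAltMin, hpeq]
      · -- a '#' occurs: t = p ++ '#' :: r
        have hplt : p.length < t.length := by omega
        set r := (t.dropWhile (· ≠ '#')).tail with hr
        have h1 : p ++ t.dropWhile (· ≠ '#') = t := by
          rw [hp]; exact List.takeWhile_append_dropWhile
        have hne : t.dropWhile (· ≠ '#') ≠ [] := by
          intro h0
          rw [h0, List.append_nil] at h1
          exact absurd (congrArg List.length h1) (by omega)
        have hdw : t.dropWhile (· ≠ '#') = '#' :: r := by
          obtain ⟨c, r', hcr⟩ := List.exists_cons_of_ne_nil hne
          have hc := List.head_dropWhile_not (p := fun x => decide (x ≠ '#')) (l := t)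
            (by rw [hcr]; exact List.cons_ne_nil _ _)
          simp only [hcr, List.head_cons] at hc
          simp at hc
          rw [hr, hcr]
          simp [hc]
        have hsplit : t = p ++ '#' :: r := by
          rw [← h1, hdw]
        have hrdrop : (l.take C.toNat).drop (i + (p.length : Int) + 1).toNat = r := by
          rw [show (i + (p.length : Int) + 1).toNat = i.toNat + (p.length + 1) by omega]
          rw [← List.drop_drop, ← ht, hsplit]
          rw [show p.length + 1 = (p ++ ['#']).length by simp]
          rw [show p ++ '#' :: r = (p ++ ['#']) ++ r by simp]
          exact List.drop_left
        rw [IH ((C - (i + (p.length : Int) + 1)).toNat) (by omega) _ rfl (by omega)]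
        rw [hrdrop]
        conv_rhs => rw [hsplit, mySplit_hash p [] r hpnh]
        simp only [List.nil_append, List.foldl_cons]
        congr 1
    · rw [fRowLoop, dif_neg h]
      have : (l.take C.toNat).drop i.toNat = [] :=
        List.drop_eq_nil_of_le (by simp; omega)
      simp [this, mySplit, fAltMin]

theorem foldl_id {α β : Type} (l : List α) (init : β) :
    l.foldl (fun acc _ => acc) init = init := by
  induction l <;> simp [List.foldl, *]

theorem row_fold_eq (A : List String) (R C : Int) (h0C : 0 < C) (h0R : 0 ≤ R) (hR : R ≤ (A.length : Int))
    (hrows : ∀ s ∈ A.take R.toNat, C ≤ (s.toList.length : Int)) (init : List Char) :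
    (PySem.List.pyRange 0 R 1).foldl
        (fun ret y => fRowLoop (PySem.List.pyGetD A y "").toList C 0 ret) init
      = (A.take R.toNat).foldl (fAltRow C) init := by
  set xs := A.take R.toNat with hxsdef
  have hxs : xs.length = R.toNat := by simp [hxsdef]; omega
  have h1 : (PySem.List.pyRange 0 R 1).foldl
      (fun ret y => fRowLoop (PySem.List.pyGetD A y "").toList C 0 ret) init
      = (PySem.List.pyRange 0 R 1).foldl
      (fun ret y => fRowLoop (PySem.List.pyGetD xs y "").toList C 0 ret) init := by
    apply PySem.List.foldl_congr_mem
    intro acc y hy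
    obtain ⟨hy0, hyR⟩ := PySem.List.mem_pyRange_one.mp hy
    have hyA : y.toNat < R.toNat := by omega
    congr 2
    conv_lhs => rw [show y = ((y.toNat : Nat) : Int) by omega]
    conv_rhs => rw [show y = ((y.toNat : Nat) : Int) by omega]
    rw [PySem.List.pyGetD_natCast, PySem.List.pyGetD_natCast, hxsdef]
    simp [List.getD_eq_getElem?_getD, List.getElem?_take]
    rw [if_pos (⟨hyR, by omega⟩ : y < R ∧ 0 < R)]
  rw [h1]
  have h2 : (R : Int) = PySem.List.len xs := by
    show _ = ((xs.length : Nat) : Int)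
    omega
  rw [h2]
  have h3 := PySem.List.foldl_pyRange_pyGetD xs ""
    (fun ret row => fRowLoop row.toList C 0 ret) init (a := 0) le_rfl
  simp only [Int.toNat_zero, List.drop_zero] at h3
  rw [h3]
  apply PySem.List.foldl_congr_mem
  intro acc row hrow
  have hlen : C ≤ (row.toList.length : Int) := hrows row (hxsdef ▸ hrow)
  rw [fRowLoop_spec row.toList C (by omega) ((C - 0).toNat) 0 rfl le_rfl acc]
  rw [fAltRow, PySem.List.slice_to _ (le_of_lt h0C), splitOn_hash]
  simp

-- ===== VERDICT (by name: the statement is the Claim_ definition above) =====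
theorem f_spec : Claim_equal_f := by
  unfold Claim_equal_f
  intro A R C _ hpre
  unfold Spec_f f f_alt
  by_cases h0C : 0 < C
  · obtain ⟨hR, hrows⟩ := hpre h0C
    by_cases h0R : 0 < R
    · simp only [if_pos (⟨h0R, h0C⟩ : 0 < R ∧ 0 < C)]
      rw [PySem.List.slice_to _ (le_of_lt h0R)]
      exact congrArg String.ofList
        (row_fold_eq A R C h0C (le_of_lt h0R) hR hrows _)
    · have hnil : PySem.List.pyRange 0 R 1 = [] :=
        PySem.List.pyRange_one_eq_nil (by omega)
      rw [hnil]
      show _ = String.ofList (if 0 < R ∧ 0 < C then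
        List.foldl (fAltRow C) (List.replicate (R + C).toNat 'z') (PySem.List.slice A none (some R))
        else List.replicate (R + C).toNat 'z')
      rw [if_neg (show ¬(0 < R ∧ 0 < C) from fun hh => h0R hh.1)]
      rfl
  · have hbody : ∀ (ret : List Char) (y : Int),
        fRowLoop (PySem.List.pyGetD A y "").toList C 0 ret = ret := by
      intro ret y
      rw [fRowLoop, dif_neg (by omega)]
    rw [PySem.List.foldl_congr_mem _ _ (fun acc _ => acc) _
      (fun acc y _ => hbody acc y)]
    rw [foldl_id]
    show _ = String.ofList (if 0 < R ∧ 0 < C then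
      List.foldl (fAltRow C) (List.replicate (R + C).toNat 'z') (PySem.List.slice A none (some R))
      else List.replicate (R + C).toNat 'z')
    rw [if_neg (show ¬(0 < R ∧ 0 < C) from fun hh => h0C hh.2)]
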